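-- pv_equiv track=rewrite | github.com/JonRivera/cs-guided-project-hash-tables-ii | src/CS_Unit_Exam_Practice.py | countVowelConsonant
-- ===== SOURCE A (Python) =====
-- def countVowelConsonant(s):
--     # want two filter out the characters that are vowel and consontant and
--     # keep track of them by adding a 1 or 2 two some variables in the for foor lop
--     vowels = ['a', 'e', 'i', 'o', 'u']
--     one = 0
--     two = 0
--     for x in s:
--         if x in vowels:
--             one += 1
--         else:
--             two += 2
--     return one + two
-- ===== SOURCE B (Python) =====
-- def countVowelConsonant(s):
--     # vowels score 1, everything else 2: count vowels, use closed form 2*len - vowels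
--     v = sum(s.count(c) for c in 'aeiou')
--     return 2 * len(s) - v
-- ===== Notes on version B (the rewrite author's own statement) =====
-- stated objective: simpler
-- what changed: Replaces the per-character branch-and-accumulate loop by counting each lowercase vowel with str.count and returning the closed form 2*len(s) - vowelcount (constant-factor speedup: C-level counting instead of a Python-level loop).
import Mathlib
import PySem

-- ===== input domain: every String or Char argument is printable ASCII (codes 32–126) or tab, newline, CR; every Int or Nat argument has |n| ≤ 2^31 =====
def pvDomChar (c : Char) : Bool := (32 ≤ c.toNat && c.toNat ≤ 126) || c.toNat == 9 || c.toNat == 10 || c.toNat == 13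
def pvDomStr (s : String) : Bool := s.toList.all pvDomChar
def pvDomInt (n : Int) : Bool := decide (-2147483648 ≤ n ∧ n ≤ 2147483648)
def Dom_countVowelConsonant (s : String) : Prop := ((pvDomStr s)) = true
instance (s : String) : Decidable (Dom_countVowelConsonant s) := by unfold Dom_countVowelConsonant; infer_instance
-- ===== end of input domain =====

-- B replaces A's per-character branch-and-accumulate loop by counting each lowercase
-- vowel and returning the closed form 2*len(s) - vowelcount (simpler; same cost).

-- ===== PORT A =====
def countVowelConsonant (s : String) : Int :=
  let vowels : List Char := ['a', 'e', 'i', 'o', 'u']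
  let st := s.toList.foldl
    (fun (p : Int × Int) x => if x ∈ vowels then (p.1 + 1, p.2) else (p.1, p.2 + 2))
    (0, 0)
  st.1 + st.2

-- ===== PORT B =====
def countVowelConsonant_alt (s : String) : Int :=
  let v : Int := (("aeiou".toList).map (fun c => (PySem.Str.count s (String.ofList [c]) : Int))).sum
  2 * PySem.Str.len s - v

-- ===== PRECONDITION & SPEC =====
def Spec_countVowelConsonant (s : String) (out : Int) : Prop := out = countVowelConsonant_alt s
instance (s : String) (out : Int) : Decidable (Spec_countVowelConsonant s out) := by unfold Spec_countVowelConsonant; infer_instance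

-- ===== CLAIM (what is proved, stated in full; the proofs are below) =====
def Claim_equal_countVowelConsonant : Prop := ∀ (s : String), Dom_countVowelConsonant s → Spec_countVowelConsonant s (countVowelConsonant s)

-- ===== LEMMAS AND PROOFS =====
lemma go_single (c : Char) : ∀ (l : List Char) (acc : Nat),
    PySem.Chars.count.go [c] l.length l acc = acc + l.count c := by
  intro l
  induction l with
  | nil => intro acc; simp [PySem.Chars.count.go]
  | cons h t ih =>
    intro acc
    rw [List.length_cons, PySem.Chars.count.go]
    by_cases hc : c = h
    · subst hc
      simp [List.isPrefixOf, ih]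
      omega
    · have hp : [c].isPrefixOf (h :: t) = false := by
        simp [List.isPrefixOf]; exact hc
      simp [hp, ih, List.count_cons]
      intro e; exact absurd e.symm hc

lemma count_single (s : String) (c : Char) :
    PySem.Str.count s (String.ofList [c]) = s.toList.count c := by
  have hm : (String.ofList [c]).toList = [c] := Eq.symm (String.ofList_eq.mp rfl)
  simp only [PySem.Str.count, hm, PySem.Chars.count, List.isEmpty_cons, Bool.false_eq_true,
    if_false]
  simpa using go_single c s.toList 0

lemma char_ite (x : Char) :
    ((if x = 'a' then (1:Int) else 0) + (if x = 'e' then 1 else 0) + (if x = 'i' then 1 else 0)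
      + (if x = 'o' then 1 else 0) + (if x = 'u' then 1 else 0))
      = (if x ∈ (['a','e','i','o','u'] : List Char) then 1 else 0) := by
  by_cases ha : x = 'a' <;> by_cases he : x = 'e' <;> by_cases hi : x = 'i' <;>
    by_cases ho : x = 'o' <;> by_cases hu : x = 'u' <;>
      simp_all

lemma sum_counts (l : List Char) :
    ((l.count 'a' : Int) + l.count 'e' + l.count 'i' + l.count 'o' + l.count 'u')
      = l.countP (fun x => x ∈ (['a','e','i','o','u'] : List Char)) := by
  induction l with
  | nil => simp
  | cons h t ih =>
    have hc := char_ite h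
    simp only [List.count_cons, List.countP_cons]
    push_cast
    simp only [beq_iff_eq, decide_eq_true_eq]
    split_ifs at hc ⊢ <;> omega

lemma foldl_inv (l : List Char) : ∀ (a b : Int),
    (l.foldl (fun (p : Int × Int) x =>
        if x ∈ (['a','e','i','o','u'] : List Char) then (p.1 + 1, p.2) else (p.1, p.2 + 2)) (a, b)).1
      + (l.foldl (fun (p : Int × Int) x =>
        if x ∈ (['a','e','i','o','u'] : List Char) then (p.1 + 1, p.2) else (p.1, p.2 + 2)) (a, b)).2
      = a + b + 2 * l.length - l.countP (fun x => x ∈ (['a','e','i','o','u'] : List Char)) := by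
  induction l with
  | nil => intro a b; simp
  | cons h t ih =>
    intro a b
    simp only [List.foldl_cons, List.countP_cons, List.length_cons]
    by_cases hm : h ∈ (['a','e','i','o','u'] : List Char)
    · rw [if_pos hm]
      have := ih (a + 1) b
      simp only [this]
      simp [hm]
      omega
    · rw [if_neg hm]
      have := ih a (b + 2)
      simp only [this]
      simp [hm]
      omega

-- ===== VERDICT (by name: the statement is the Claim_ definition above) =====
theorem countVowelConsonant_spec : Claim_equal_countVowelConsonant := by
  intro s _
  show countVowelConsonant s = countVowelConsonant_alt s
  have hf := foldl_inv s.toList 0 0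
  have hs := sum_counts s.toList
  have hv : "aeiou".toList = ['a','e','i','o','u'] := rfl
  simp only [countVowelConsonant, countVowelConsonant_alt, List.map_cons, List.map_nil,
    List.sum_cons, List.sum_nil, count_single, PySem.Str.len, hf, hv]
  push_cast at hs ⊢
  omega
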